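-- pv_equiv track=rewrite | github.com/Thundastormgod/CodebaseCSI | ml-integration/data_collection/collect_data.py | _augment_rename
-- ===== SOURCE A (Python) =====
-- def _augment_rename(code: str) -> str:
--     """Rename variables."""
--     # Simple variable name replacement
--     replacements = {
--         'result': 'output',
--         'data': 'items',
--         'value': 'val',
--         'number': 'num',
--     }
--
--     for old, new in replacements.items():
--         code = code.replace(old, new)
--
--     return code
-- ===== SOURCE B (Python) =====
-- def _augment_rename(code: str) -> str:
--     # Single left-to-right scan: at each position try the rename keys in order
--     # and emit the substitution, instead of four sequential full-string passes.
--     table = [('result', 'output'), ('data', 'items'), ('value', 'val'), ('number', 'num')]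
--     out = []
--     i = 0
--     n = len(code)
--     while i < n:
--         for old, new in table:
--             if code.startswith(old, i):
--                 out.append(new)
--                 i += len(old)
--                 break
--         else:
--             out.append(code[i])
--             i += 1
--     return ''.join(out)
-- ===== Notes on version B (the rewrite author's own statement) =====
-- stated objective: alternative
-- what changed: Replaces A's four sequential full-string replace passes by a single left-to-right scan that tries the replacement keys at each position and emits the substitution directly.
-- outside the precondition, e.g. on _augment_rename('numberesult'): A returns 'numbeoutput', B returns 'numesult'
import Mathlib
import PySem

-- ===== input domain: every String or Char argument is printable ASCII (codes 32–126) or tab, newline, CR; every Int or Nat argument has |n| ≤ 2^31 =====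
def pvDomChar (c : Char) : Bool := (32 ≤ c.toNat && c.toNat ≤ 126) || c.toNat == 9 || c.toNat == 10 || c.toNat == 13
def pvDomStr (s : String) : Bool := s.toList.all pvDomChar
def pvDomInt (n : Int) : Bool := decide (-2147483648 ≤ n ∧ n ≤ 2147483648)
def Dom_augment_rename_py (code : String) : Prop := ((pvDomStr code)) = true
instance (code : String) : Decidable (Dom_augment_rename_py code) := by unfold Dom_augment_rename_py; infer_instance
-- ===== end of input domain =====

-- B replaces A's four sequential full-string replace passes by one left-to-right
-- scan trying the keys at each position (objective: alternative, same cost).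

-- ===== PORT A =====
def augment_rename_py (code : String) : String :=
  let replacements : PySem.Dict String String :=
    ((((PySem.Dict.empty).insert "result" "output").insert "data" "items").insert "value" "val").insert "number" "num"
  replacements.items.foldl (fun code kv => PySem.Str.replace code kv.1 kv.2) code

-- ===== PORT B =====
def pvOnePass : List Char → List Char
  | [] => []
  | c :: t =>
    if List.isPrefixOf "result".toList (c :: t) then "output".toList ++ pvOnePass (t.drop 5)
    else if List.isPrefixOf "data".toList (c :: t) then "items".toList ++ pvOnePass (t.drop 3)
    else if List.isPrefixOf "value".toList (c :: t) then "val".toList ++ pvOnePass (t.drop 4)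
    else if List.isPrefixOf "number".toList (c :: t) then "num".toList ++ pvOnePass (t.drop 5)
    else c :: pvOnePass t
termination_by l => l.length
decreasing_by all_goals (simp only [List.length_drop, List.length_cons]; omega)

def augment_rename_py_alt (code : String) : String :=
  String.ofList (pvOnePass code.toList)

-- ===== PRECONDITION & SPEC =====
-- Pre_ excludes strings containing "numberesult", where two rename keys overlap
-- and A's fixed pass order against B's left-to-right scan is an accidental
-- tie-break no caller specifies.
def Pre_augment_rename_py (code : String) : Prop :=
  ¬ ("numberesult".toList <:+: code.toList)
instance (code : String) : Decidable (Pre_augment_rename_py code) := by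
  unfold Pre_augment_rename_py; infer_instance

def pvWitness_augment_rename_py : String := "let result = data + value + number"

def Spec_augment_rename_py (code : String) (out : String) : Prop := out = augment_rename_py_alt code
instance (code : String) (out : String) : Decidable (Spec_augment_rename_py code out) := by unfold Spec_augment_rename_py; infer_instance

-- ===== CLAIM (what is proved, stated in full; the proofs are below) =====
def Claim_equal_augment_rename_py : Prop := ∀ (code : String), Dom_augment_rename_py code → Pre_augment_rename_py code → Spec_augment_rename_py code (augment_rename_py code)

-- ===== LEMMAS AND PROOFS =====

-- A clean structural version of PySem.Chars.replace (for nonempty pattern).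
def repAux (old new : List Char) : List Char → List Char
  | [] => []
  | c :: t =>
    if List.isPrefixOf old (c :: t) then new ++ repAux old new (t.drop (old.length - 1))
    else c :: repAux old new t
termination_by l => l.length
decreasing_by all_goals (simp only [List.length_drop, List.length_cons]; omega)

theorem repAux_neg (old new : List Char) (c : Char) (t : List Char)
    (h : ¬ List.isPrefixOf old (c :: t)) :
    repAux old new (c :: t) = c :: repAux old new t := by
  rw [repAux, if_neg h]

theorem go_zero (old new l acc : List Char) :
    PySem.Chars.replace.go old new 0 l acc = acc.reverse ++ l := rfl

theorem go_nil (old new acc : List Char) (n : Nat) :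
    PySem.Chars.replace.go old new (n + 1) [] acc = acc.reverse := rfl

theorem go_cons (old new acc : List Char) (n : Nat) (c : Char) (t : List Char) :
    PySem.Chars.replace.go old new (n + 1) (c :: t) acc =
      if List.isPrefixOf old (c :: t) then
        PySem.Chars.replace.go old new n (List.drop old.length (c :: t)) (new.reverse ++ acc)
      else PySem.Chars.replace.go old new n t (c :: acc) := rfl

theorem go_eq (old new : List Char) (h : old ≠ []) :
    ∀ (fuel : Nat) (l acc : List Char), l.length ≤ fuel →
      PySem.Chars.replace.go old new fuel l acc = acc.reverse ++ repAux old new l := by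
  intro fuel
  induction fuel with
  | zero =>
    intro l acc hl
    have hnil : l = [] := List.eq_nil_of_length_eq_zero (Nat.le_zero.mp hl)
    subst hnil
    rw [go_zero, repAux]
  | succ n ih =>
    intro l acc hl
    cases l with
    | nil => rw [go_nil, repAux, List.append_nil]
    | cons c t =>
      rw [go_cons]
      by_cases hp : List.isPrefixOf old (c :: t)
      · rw [if_pos hp]
        obtain ⟨o0, o', ho⟩ : ∃ o0 o', old = o0 :: o' := by
          cases old with
          | nil => exact absurd rfl h
          | cons a b => exact ⟨a, b, rfl⟩
        have hdrop : List.drop old.length (c :: t) = t.drop (old.length - 1) := by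
          subst ho; simp [List.drop_succ_cons]
        rw [hdrop, ih _ _ (le_trans (t.length_drop ▸ Nat.sub_le _ _) (Nat.le_of_succ_le_succ hl))]
        rw [repAux, if_pos hp]
        simp
      · rw [if_neg hp]
        rw [ih t (c :: acc) (Nat.le_of_succ_le_succ hl)]
        rw [repAux_neg old new c t hp]
        simp

theorem replace_eq_repAux (old new l : List Char) (h : old ≠ []) :
    PySem.Chars.replace l old new = repAux old new l := by
  unfold PySem.Chars.replace
  rw [if_neg (by simp [List.isEmpty_iff, h])]
  simpa using go_eq old new h l.length l [] le_rfl

theorem repAux_pos (old new rest : List Char) (h : old ≠ []) :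
    repAux old new (old ++ rest) = new ++ repAux old new rest := by
  obtain ⟨o0, o', ho⟩ : ∃ o0 o', old = o0 :: o' := by
    cases old with
    | nil => exact absurd rfl h
    | cons a b => exact ⟨a, b, rfl⟩
  subst ho
  rw [List.cons_append, repAux, if_pos]
  · simp
  · exact List.isPrefixOf_iff_prefix.mpr ⟨rest, by simp⟩

theorem repAux_skip (old new : List Char) (h0 : Char) (hh : old.head? = some h0)
    (v t : List Char) (hv : h0 ∉ v) :
    repAux old new (v ++ t) = v ++ repAux old new t := by
  induction v with
  | nil => simp
  | cons a v' ih =>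
    have ha : h0 ≠ a := fun he => hv (he ▸ List.mem_cons_self)
    have hnp : ¬ List.isPrefixOf old (a :: (v' ++ t)) := by
      intro hp
      cases old with
      | nil => simp at hh
      | cons q qs =>
        have hq : q = h0 := by simpa using hh
        rw [List.isPrefixOf_iff_prefix, List.cons_prefix_cons] at hp
        exact ha (hq ▸ hp.1)
    rw [List.cons_append, repAux_neg _ _ _ _ hnp,
      ih (fun hm => hv (List.mem_cons_of_mem a hm)), List.cons_append]

theorem repAux_prefix_back (old new : List Char) (hn : Char) (hnew : new.head? = some hn) :
    ∀ (n : Nat) (l p : List Char), l.length ≤ n → hn ∉ p →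
      p <+: repAux old new l → p <+: l := by
  intro n
  induction n with
  | zero =>
    intro l p hl _ hpre
    have hnil : l = [] := List.eq_nil_of_length_eq_zero (Nat.le_zero.mp hl)
    subst hnil
    rw [repAux] at hpre
    exact hpre
  | succ n ih =>
    intro l p hl hp hpre
    cases l with
    | nil =>
      rw [repAux] at hpre
      exact hpre
    | cons c t =>
      by_cases hg : List.isPrefixOf old (c :: t)
      · rw [repAux, if_pos hg] at hpre
        cases p with
        | nil => exact List.nil_prefix
        | cons q ps =>
          obtain ⟨n0, n', hn0⟩ : ∃ n0 n', new = n0 :: n' := by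
            cases new with
            | nil => simp at hnew
            | cons a b => exact ⟨a, b, rfl⟩
          have hq : q = hn := by
            rw [hn0, List.cons_append, List.cons_prefix_cons] at hpre
            have hnn : n0 = hn := by simpa [hn0] using hnew
            rw [hpre.1, hnn]
          exact absurd (by rw [← hq]; exact List.mem_cons_self) hp
      · rw [repAux_neg _ _ _ _ hg] at hpre
        cases p with
        | nil => exact List.nil_prefix
        | cons q ps =>
          rw [List.cons_prefix_cons] at hpre
          have hps : ps <+: t :=
            ih t ps (Nat.le_of_succ_le_succ hl) (fun hm => hp (List.mem_cons_of_mem q hm)) hpre.2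
          exact List.cons_prefix_cons.mpr ⟨hpre.1, hps⟩

-- abbreviations for the four passes
def pvR1 (l : List Char) : List Char := repAux "result".toList "output".toList l
def pvR2 (l : List Char) : List Char := repAux "data".toList "items".toList l
def pvR3 (l : List Char) : List Char := repAux "value".toList "val".toList l
def pvR4 (l : List Char) : List Char := repAux "number".toList "num".toList l

theorem main_list :
    ∀ l : List Char, ¬ ("numberesult".toList <:+: l) →
      pvR4 (pvR3 (pvR2 (pvR1 l))) = pvOnePass l := by
  intro l
  induction l using pvOnePass.induct with
  | case1 =>
    intro _
    simp [pvR1, pvR2, pvR3, pvR4, repAux, pvOnePass]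
  | case2 c t h ih =>
    intro hpre
    obtain ⟨s, hs⟩ := List.isPrefixOf_iff_prefix.mp h
    have hsuf : s <:+ c :: t := hs ▸ List.suffix_append "result".toList s
    have hpres : ¬ ("numberesult".toList <:+: s) := fun hi => hpre (hi.trans hsuf.isInfix)
    have hsdrop : t.drop 5 = s := by
      have h6 : (c :: t).drop 6 = s := by rw [← hs]; simp
      simpa using h6
    rw [pvOnePass, if_pos h, ← hs]
    unfold pvR1 pvR2 pvR3 pvR4
    rw [repAux_pos _ _ _ (by decide)]
    rw [repAux_skip "data".toList _ 'd' (by decide) "output".toList _ (by decide)]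
    rw [repAux_skip "value".toList _ 'v' (by decide) "output".toList _ (by decide)]
    rw [repAux_skip "number".toList _ 'n' (by decide) "output".toList _ (by decide)]
    rw [hsdrop] at ih ⊢
    have hfin := ih hpres
    unfold pvR1 pvR2 pvR3 pvR4 at hfin
    rw [hfin]
  | case3 c t h1 h ih =>
    intro hpre
    obtain ⟨s, hs⟩ := List.isPrefixOf_iff_prefix.mp h
    have hsuf : s <:+ c :: t := hs ▸ List.suffix_append "data".toList s
    have hpres : ¬ ("numberesult".toList <:+: s) := fun hi => hpre (hi.trans hsuf.isInfix)
    have hsdrop : t.drop 3 = s := by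
      have h4 : (c :: t).drop 4 = s := by rw [← hs]; simp
      simpa using h4
    rw [pvOnePass, if_neg h1, if_pos h, ← hs]
    unfold pvR1 pvR2 pvR3 pvR4
    rw [repAux_skip "result".toList _ 'r' (by decide) "data".toList _ (by decide)]
    rw [repAux_pos _ _ _ (by decide)]
    rw [repAux_skip "value".toList _ 'v' (by decide) "items".toList _ (by decide)]
    rw [repAux_skip "number".toList _ 'n' (by decide) "items".toList _ (by decide)]
    rw [hsdrop] at ih ⊢
    have hfin := ih hpres
    unfold pvR1 pvR2 pvR3 pvR4 at hfin
    rw [hfin]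
  | case4 c t h1 h2 h ih =>
    intro hpre
    obtain ⟨s, hs⟩ := List.isPrefixOf_iff_prefix.mp h
    have hsuf : s <:+ c :: t := hs ▸ List.suffix_append "value".toList s
    have hpres : ¬ ("numberesult".toList <:+: s) := fun hi => hpre (hi.trans hsuf.isInfix)
    have hsdrop : t.drop 4 = s := by
      have h5 : (c :: t).drop 5 = s := by rw [← hs]; simp
      simpa using h5
    rw [pvOnePass, if_neg h1, if_neg h2, if_pos h, ← hs]
    unfold pvR1 pvR2 pvR3 pvR4
    rw [repAux_skip "result".toList _ 'r' (by decide) "value".toList _ (by decide)]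
    rw [repAux_skip "data".toList _ 'd' (by decide) "value".toList _ (by decide)]
    rw [repAux_pos _ _ _ (by decide)]
    rw [repAux_skip "number".toList _ 'n' (by decide) "val".toList _ (by decide)]
    rw [hsdrop] at ih ⊢
    have hfin := ih hpres
    unfold pvR1 pvR2 pvR3 pvR4 at hfin
    rw [hfin]
  | case5 c t h1 h2 h3 h ih =>
    intro hpre
    obtain ⟨s, hs⟩ := List.isPrefixOf_iff_prefix.mp h
    have hsuf : s <:+ c :: t := hs ▸ List.suffix_append "number".toList s
    have hpres : ¬ ("numberesult".toList <:+: s) := fun hi => hpre (hi.trans hsuf.isInfix)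
    have hsdrop : t.drop 5 = s := by
      have h6 : (c :: t).drop 6 = s := by rw [← hs]; simp
      simpa using h6
    rw [pvOnePass, if_neg h1, if_neg h2, if_neg h3, if_pos h, ← hs]
    -- the first pass walks through this key untouched: its last character is the
    -- only place a pass-one match could start, and Pre_ forbids "numberesult"
    have hr : ¬ List.isPrefixOf "result".toList ('r' :: s) := by
      intro hp
      obtain ⟨s2, hs2⟩ := List.isPrefixOf_iff_prefix.mp hp
      have htail : "esult".toList ++ s2 = s := by
        have h' := hs2
        rw [show ("result".toList : List Char) = 'r' :: "esult".toList from rfl,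
          List.cons_append] at h'
        injection h'
      apply hpre
      refine ⟨[], s2, ?_⟩
      rw [← hs, ← htail]
      rfl
    have hx : ∀ X : List Char, ("numbe".toList : List Char) ++ 'r' :: X = "number".toList ++ X :=
      fun X => rfl
    unfold pvR1 pvR2 pvR3 pvR4
    rw [← hx s]
    rw [repAux_skip "result".toList _ 'r' (by decide) "numbe".toList _ (by decide)]
    rw [repAux_neg _ _ _ _ hr, hx]
    rw [repAux_skip "data".toList _ 'd' (by decide) "number".toList _ (by decide)]
    rw [repAux_skip "value".toList _ 'v' (by decide) "number".toList _ (by decide)]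
    rw [repAux_pos _ _ _ (by decide)]
    rw [hsdrop] at ih ⊢
    have hfin := ih hpres
    unfold pvR1 pvR2 pvR3 pvR4 at hfin
    rw [hfin]
  | case6 c t h1 h2 h3 h4 ih =>
    intro hpre
    have hsuf : t <:+ c :: t := ⟨[c], rfl⟩
    have hpret : ¬ ("numberesult".toList <:+: t) := fun hi => hpre (hi.trans hsuf.isInfix)
    rw [pvOnePass, if_neg h1, if_neg h2, if_neg h3, if_neg h4]
    unfold pvR1 pvR2 pvR3 pvR4
    rw [repAux_neg _ _ _ _ h1]
    have hnp2 : ¬ List.isPrefixOf "data".toList (c :: repAux "result".toList "output".toList t) := by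
      intro hp
      rw [List.isPrefixOf_iff_prefix,
        show ("data".toList : List Char) = 'd' :: "ata".toList from rfl,
        List.cons_prefix_cons] at hp
      have hb : ("ata".toList : List Char) <+: t :=
        repAux_prefix_back _ _ 'o' (by decide) t.length t _ le_rfl (by decide) hp.2
      exact h2 (List.isPrefixOf_iff_prefix.mpr (List.cons_prefix_cons.mpr ⟨hp.1, hb⟩))
    rw [repAux_neg _ _ _ _ hnp2]
    have hnp3 : ¬ List.isPrefixOf "value".toList
        (c :: repAux "data".toList "items".toList (repAux "result".toList "output".toList t)) := by
      intro hp
      rw [List.isPrefixOf_iff_prefix,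
        show ("value".toList : List Char) = 'v' :: "alue".toList from rfl,
        List.cons_prefix_cons] at hp
      have hb1 : ("alue".toList : List Char) <+: repAux "result".toList "output".toList t :=
        repAux_prefix_back _ _ 'i' (by decide) _ _ _ le_rfl (by decide) hp.2
      have hb : ("alue".toList : List Char) <+: t :=
        repAux_prefix_back _ _ 'o' (by decide) t.length t _ le_rfl (by decide) hb1
      exact h3 (List.isPrefixOf_iff_prefix.mpr (List.cons_prefix_cons.mpr ⟨hp.1, hb⟩))
    rw [repAux_neg _ _ _ _ hnp3]
    have hnp4 : ¬ List.isPrefixOf "number".toList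
        (c :: repAux "value".toList "val".toList (repAux "data".toList "items".toList
            (repAux "result".toList "output".toList t))) := by
      intro hp
      rw [List.isPrefixOf_iff_prefix,
        show ("number".toList : List Char) = 'n' :: "umber".toList from rfl,
        List.cons_prefix_cons] at hp
      have hb2 : ("umber".toList : List Char) <+:
          repAux "data".toList "items".toList (repAux "result".toList "output".toList t) :=
        repAux_prefix_back _ _ 'v' (by decide) _ _ _ le_rfl (by decide) hp.2
      have hb1 : ("umber".toList : List Char) <+: repAux "result".toList "output".toList t :=
        repAux_prefix_back _ _ 'i' (by decide) _ _ _ le_rfl (by decide) hb2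
      have hb : ("umber".toList : List Char) <+: t :=
        repAux_prefix_back _ _ 'o' (by decide) t.length t _ le_rfl (by decide) hb1
      exact h4 (List.isPrefixOf_iff_prefix.mpr (List.cons_prefix_cons.mpr ⟨hp.1, hb⟩))
    rw [repAux_neg _ _ _ _ hnp4]
    have hfin := ih hpret
    unfold pvR1 pvR2 pvR3 pvR4 at hfin
    rw [hfin]

-- ===== VERDICT (by name: the statement is the Claim_ definition above) =====
theorem augment_rename_py_spec : Claim_equal_augment_rename_py := by
  intro code _hdom hpre
  unfold Pre_augment_rename_py at hpre
  unfold Spec_augment_rename_py augment_rename_py_alt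
  have hA : augment_rename_py code =
      PySem.Str.replace (PySem.Str.replace (PySem.Str.replace
        (PySem.Str.replace code "result" "output") "data" "items") "value" "val") "number" "num" := rfl
  rw [hA]
  simp only [PySem.Str.replace, String.toList_ofList]
  rw [replace_eq_repAux _ _ _ (by decide), replace_eq_repAux _ _ _ (by decide),
      replace_eq_repAux _ _ _ (by decide), replace_eq_repAux _ _ _ (by decide)]
  exact congrArg String.ofList (main_list code.toList hpre)
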